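-- pv_equiv track=rewrite | github.com/nathsujal/OdiaOCR | main.py | merge_vertical_boxes
-- ===== SOURCE A (Python) =====
-- def merge_vertical_boxes(boxes, vertical_threshold=5, horizontal_tolerance=5):
--     """Merge vertically aligned boxes with small vertical gaps."""
--     if not boxes:
--         return []
--
--     # Sort boxes by y-coordinate (top to bottom)
--     sorted_boxes = sorted(boxes, key=lambda box: box[1])
--
--     merged_boxes = []
--     current_group = [sorted_boxes[0]]
--
--     for box in sorted_boxes[1:]:
--         last_box = current_group[-1]
--         vertical_distance = box[1] - (last_box[1] + last_box[3])
--
--         # Check vertical proximity and horizontal alignment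
--         if vertical_distance <= vertical_threshold:
--             x_diff = abs(box[0] - last_box[0])
--             if x_diff <= horizontal_tolerance:
--                 current_group.append(box)
--             else:
--                 merged_boxes.append(merge_group(current_group))
--                 current_group = [box]
--         else:
--             merged_boxes.append(merge_group(current_group))
--             current_group = [box]
--
--     merged_boxes.append(merge_group(current_group))
--     return merged_boxes
--
-- def merge_group(group):
--     """Merge a group of boxes into a single bounding box."""
--     x = min(b[0] for b in group)
--     y = min(b[1] for b in group)
--     max_x = max(b[0] + b[2] for b in group)
--     max_y = max(b[1] + b[3] for b in group)
--     return (x, y, max_x - x, max_y - y)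
-- ===== SOURCE B (Python) =====
-- def merge_vertical_boxes(boxes, vertical_threshold=5, horizontal_tolerance=5):
--     """Single reverse sweep over the y-sorted boxes: each box either extends the
--     bounding-box extents of the group below it (updated in place) or opens a new
--     group; the output is built back-to-front from the extents. No group lists,
--     no merge step."""
--     sb = sorted(boxes, key=lambda box: box[1])
--     acc = []      # one (x0, y0, x1, y1) extent per group, last group first
--     nxt = None    # the box just below the current one in sb
--     for box in reversed(sb):
--         x, y, w, h = box
--         if acc and nxt is not None and (
--                 nxt[1] - (y + h) <= vertical_threshold
--                 and abs(nxt[0] - x) <= horizontal_tolerance):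
--             X0, Y0, X1, Y1 = acc[-1]
--             acc[-1] = (min(X0, x), min(Y0, y), max(X1, x + w), max(Y1, y + h))
--         else:
--             acc.append((x, y, x + w, y + h))
--         nxt = box
--     return [(x0, y0, x1 - x0, y1 - y0) for (x0, y0, x1, y1) in reversed(acc)]
-- ===== Notes on version B (the rewrite author's own statement) =====
-- stated objective: alternative
-- what changed: A scans the y-sorted list top-down collecting each group as a list and flushing it through merge_group (four min/max passes) on every break; B instead sweeps the sorted list bottom-up once, never materialising groups: each box either unions its extents into the in-place bounding-box extents of the group below it or opens a new one, and the output is built back-to-front.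
import Mathlib
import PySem

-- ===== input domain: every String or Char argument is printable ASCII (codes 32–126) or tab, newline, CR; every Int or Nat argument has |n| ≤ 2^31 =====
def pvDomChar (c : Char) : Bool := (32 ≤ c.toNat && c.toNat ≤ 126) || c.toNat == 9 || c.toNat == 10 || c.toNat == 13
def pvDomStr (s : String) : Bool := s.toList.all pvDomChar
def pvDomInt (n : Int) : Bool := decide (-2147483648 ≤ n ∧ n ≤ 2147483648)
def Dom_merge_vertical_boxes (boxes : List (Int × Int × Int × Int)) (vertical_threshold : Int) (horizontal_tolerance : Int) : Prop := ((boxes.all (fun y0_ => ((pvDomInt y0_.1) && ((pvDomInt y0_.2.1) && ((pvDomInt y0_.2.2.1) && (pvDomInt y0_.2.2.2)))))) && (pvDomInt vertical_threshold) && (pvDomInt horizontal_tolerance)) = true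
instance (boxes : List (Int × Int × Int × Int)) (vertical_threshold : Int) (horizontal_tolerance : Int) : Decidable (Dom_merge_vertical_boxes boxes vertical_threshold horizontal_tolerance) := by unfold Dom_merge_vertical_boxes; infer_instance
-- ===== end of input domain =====

-- B replaces A's top-down group-collect-and-flush loop (with merge_group) by a single
-- bottom-up sweep that unions each box into the bounding-box extents of the group below
-- it, building the output back-to-front (objective: alternative decomposition, same cost).

-- ===== PORT A =====
-- merge_group of A: min/max over generator expressions; the `.getD 0` only guards the
-- empty group, which never occurs (Python's min would raise there).
def pvMergeGroupA (group : List (Int × Int × Int × Int)) : Int × Int × Int × Int :=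
  let x := (PySem.List.min? (group.map (fun b => b.1)) (fun v => v)).getD 0
  let y := (PySem.List.min? (group.map (fun b => b.2.1)) (fun v => v)).getD 0
  let mx := (PySem.List.max? (group.map (fun b => b.1 + b.2.2.1)) (fun v => v)).getD 0
  let my := (PySem.List.max? (group.map (fun b => b.2.1 + b.2.2.2)) (fun v => v)).getD 0
  (x, y, mx - x, my - y)

-- A's for-loop over sorted_boxes[1:], state = (merged_boxes, current_group)
def pvLoopA (vt ht : Int) (merged : List (Int × Int × Int × Int))
    (cur : List (Int × Int × Int × Int)) :
    List (Int × Int × Int × Int) → List (Int × Int × Int × Int)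
  | [] => merged ++ [pvMergeGroupA cur]
  | b :: rest =>
    let last := (PySem.List.pyGet? cur (-1)).getD (0, 0, 0, 0)  -- cur is never empty
    if b.2.1 - (last.2.1 + last.2.2.2) ≤ vt then
      if |b.1 - last.1| ≤ ht then
        pvLoopA vt ht merged (cur ++ [b]) rest
      else
        pvLoopA vt ht (merged ++ [pvMergeGroupA cur]) [b] rest
    else
      pvLoopA vt ht (merged ++ [pvMergeGroupA cur]) [b] rest

def merge_vertical_boxes (boxes : List (Int × Int × Int × Int)) (vertical_threshold : Int) (horizontal_tolerance : Int) : List (Int × Int × Int × Int) :=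
  if boxes = [] then []
  else
    match PySem.List.sorted boxes (fun box => box.2.1) false with
    | [] => []  -- unreachable: sorted of a nonempty list is nonempty
    | h :: t => pvLoopA vertical_threshold horizontal_tolerance [] [h] t

-- ===== PORT B =====
-- one step of B's reverse sweep; state = (acc of group extents, nxt = box just below)
def pvStepB (vt ht : Int)
    (st : List (Int × Int × Int × Int) × Option (Int × Int × Int × Int))
    (b : Int × Int × Int × Int) :
    List (Int × Int × Int × Int) × Option (Int × Int × Int × Int) :=
  let acc := st.1
  let joins : Bool := (!(acc.isEmpty)) &&
    (match st.2 with
     | some nxt => decide (nxt.2.1 - (b.2.1 + b.2.2.2) ≤ vt) && decide (|nxt.1 - b.1| ≤ ht)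
     | none => false)
  if joins then
    let e := (acc.getLast?).getD (0, 0, 0, 0)  -- acc nonempty here
    (acc.dropLast ++ [(min e.1 b.1, min e.2.1 b.2.1,
       max e.2.2.1 (b.1 + b.2.2.1), max e.2.2.2 (b.2.1 + b.2.2.2))], some b)
  else
    (acc ++ [(b.1, b.2.1, b.1 + b.2.2.1, b.2.1 + b.2.2.2)], some b)

def merge_vertical_boxes_alt (boxes : List (Int × Int × Int × Int)) (vertical_threshold : Int) (horizontal_tolerance : Int) : List (Int × Int × Int × Int) :=
  let sb := PySem.List.sorted boxes (fun box => box.2.1) false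
  let st := (sb.reverse).foldl (pvStepB vertical_threshold horizontal_tolerance) ([], none)
  (st.1.reverse).map (fun e => (e.1, e.2.1, e.2.2.1 - e.1, e.2.2.2 - e.2.1))

-- ===== PRECONDITION & SPEC =====
def Spec_merge_vertical_boxes (boxes : List (Int × Int × Int × Int)) (vertical_threshold : Int) (horizontal_tolerance : Int) (out : List (Int × Int × Int × Int)) : Prop := out = merge_vertical_boxes_alt boxes vertical_threshold horizontal_tolerance
instance (boxes : List (Int × Int × Int × Int)) (vertical_threshold : Int) (horizontal_tolerance : Int) (out : List (Int × Int × Int × Int)) : Decidable (Spec_merge_vertical_boxes boxes vertical_threshold horizontal_tolerance out) := by unfold Spec_merge_vertical_boxes; infer_instance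

-- ===== CLAIM (what is proved, stated in full; the proofs are below) =====
def Claim_equal_merge_vertical_boxes : Prop := ∀ (boxes : List (Int × Int × Int × Int)) (vertical_threshold : Int) (horizontal_tolerance : Int), Dom_merge_vertical_boxes boxes vertical_threshold horizontal_tolerance → Spec_merge_vertical_boxes boxes vertical_threshold horizontal_tolerance (merge_vertical_boxes boxes vertical_threshold horizontal_tolerance)

-- ===== LEMMAS AND PROOFS =====

-- proof-side vocabulary: box extents, union of extents, extents → box, adjacency
def pvExtB (b : Int × Int × Int × Int) : Int × Int × Int × Int :=
  (b.1, b.2.1, b.1 + b.2.2.1, b.2.1 + b.2.2.2)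

def pvUnionE (e f : Int × Int × Int × Int) : Int × Int × Int × Int :=
  (min e.1 f.1, min e.2.1 f.2.1, max e.2.2.1 f.2.2.1, max e.2.2.2 f.2.2.2)

def pvToBoxE (e : Int × Int × Int × Int) : Int × Int × Int × Int :=
  (e.1, e.2.1, e.2.2.1 - e.1, e.2.2.2 - e.2.1)

def pvAdj (vt ht : Int) (prev cur : Int × Int × Int × Int) : Bool :=
  decide (cur.2.1 - (prev.2.1 + prev.2.2.2) ≤ vt) && decide (|cur.1 - prev.1| ≤ ht)

-- reference recursion: list of group extents of (prev :: t) where prev's group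
-- already has extents e
def pvRecE (vt ht : Int) (e prev : Int × Int × Int × Int) :
    List (Int × Int × Int × Int) → List (Int × Int × Int × Int)
  | [] => [e]
  | b :: t =>
    if pvAdj vt ht prev b then pvRecE vt ht (pvUnionE e (pvExtB b)) b t
    else e :: pvRecE vt ht (pvExtB b) b t

theorem pvRecE_ne_nil (vt ht : Int) (e prev : Int × Int × Int × Int)
    (t : List (Int × Int × Int × Int)) : pvRecE vt ht e prev t ≠ [] := by
  induction t generalizing e prev with
  | nil => simp [pvRecE]
  | cons b t ih =>
    simp only [pvRecE]
    split
    · exact ih _ _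
    · simp

theorem pvUnionE_comm (e f : Int × Int × Int × Int) : pvUnionE e f = pvUnionE f e := by
  simp [pvUnionE, min_comm, max_comm]

theorem pvUnionE_assoc (e f g : Int × Int × Int × Int) :
    pvUnionE (pvUnionE e f) g = pvUnionE e (pvUnionE f g) := by
  simp [pvUnionE, min_assoc, max_assoc]

theorem pvRecE_headUnion (vt ht : Int) (t : List (Int × Int × Int × Int))
    (x e prev : Int × Int × Int × Int) :
    pvRecE vt ht (pvUnionE x e) prev t
      = (pvRecE vt ht e prev t).modifyHead (fun y => pvUnionE x y) := by
  induction t generalizing e prev with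
  | nil => simp [pvRecE]
  | cons b t ih =>
    simp only [pvRecE]
    split
    · rw [pvUnionE_assoc, ih]
    · simp

-- extents of a nonempty group, as A accumulates it
def pvExtE : List (Int × Int × Int × Int) → Int × Int × Int × Int
  | [] => (0, 0, 0, 0)
  | c :: r => r.foldl (fun e b => pvUnionE e (pvExtB b)) (pvExtB c)

theorem pvExtE_append (g : List (Int × Int × Int × Int)) (hg : g ≠ [])
    (b : Int × Int × Int × Int) :
    pvExtE (g ++ [b]) = pvUnionE (pvExtE g) (pvExtB b) := by
  rcases g with _ | ⟨c, r⟩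
  · exact absurd rfl hg
  · simp [pvExtE, List.foldl_append]

-- B's joint fold computes the four separate extrema of A's merge_group
theorem pvFold_quad (rest : List (Int × Int × Int × Int)) (a b c d : Int) :
    rest.foldl (fun e bx => pvUnionE e (pvExtB bx)) (a, b, c, d)
    = ((rest.map (fun bx => bx.1)).foldl min a,
       (rest.map (fun bx => bx.2.1)).foldl min b,
       (rest.map (fun bx => bx.1 + bx.2.2.1)).foldl max c,
       (rest.map (fun bx => bx.2.1 + bx.2.2.2)).foldl max d) := by
  induction rest generalizing a b c d with
  | nil => rfl
  | cons x xs ih =>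
    simp only [List.foldl_cons, List.map_cons]
    rw [show pvUnionE (a, b, c, d) (pvExtB x)
        = (min a x.1, min b x.2.1, max c (x.1 + x.2.2.1), max d (x.2.1 + x.2.2.2)) from rfl]
    exact ih _ _ _ _

theorem pvMergeGroupA_eq (g : List (Int × Int × Int × Int)) (hg : g ≠ []) :
    pvMergeGroupA g = pvToBoxE (pvExtE g) := by
  match g with
  | [] => exact absurd rfl hg
  | (x, y, w, h) :: rest =>
    simp only [pvMergeGroupA, pvToBoxE, pvExtE, List.map_cons,
      PySem.List.min?_id_cons, PySem.List.max?_id_cons, Option.getD_some]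
    rw [show pvExtB (x, y, w, h) = (x, y, x + w, y + h) from rfl, pvFold_quad]

-- A's loop produces the reference groups, merged left to right
theorem pvLoopA_eq (vt ht : Int) (rest : List (Int × Int × Int × Int)) :
    ∀ (merged g : List (Int × Int × Int × Int)) (prev : Int × Int × Int × Int),
      g.getLast? = some prev →
      pvLoopA vt ht merged g rest
        = merged ++ (pvRecE vt ht (pvExtE g) prev rest).map pvToBoxE := by
  induction rest with
  | nil =>
    intro merged g prev hl
    have hg : g ≠ [] := by intro h; simp [h] at hl
    simp [pvLoopA, pvRecE, pvMergeGroupA_eq g hg]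
  | cons b rest ih =>
    intro merged g prev hl
    have hg : g ≠ [] := by intro h; simp [h] at hl
    have hlast : (PySem.List.pyGet? g (-1)).getD (0, 0, 0, 0) = prev := by
      rw [PySem.List.pyGet?_neg_one, hl]; rfl
    simp only [pvLoopA, pvRecE, hlast, pvAdj]
    by_cases h1 : b.2.1 - (prev.2.1 + prev.2.2.2) ≤ vt
    · by_cases h2 : |b.1 - prev.1| ≤ ht
      · simp only [h1, h2, decide_true, Bool.and_self, if_pos]
        rw [ih merged (g ++ [b]) b (by simp), pvExtE_append g hg]
      · simp only [h1, h2, if_true, decide_true, decide_false,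
          Bool.and_false, Bool.false_eq_true, if_neg, not_false_iff]
        rw [ih (merged ++ [pvMergeGroupA g]) [b] b (by simp), List.map_cons,
          pvMergeGroupA_eq g hg]
        simp [pvExtE, pvExtB]
    · simp only [h1, decide_false, Bool.false_and, Bool.false_eq_true,
        if_neg, not_false_iff]
      rw [ih (merged ++ [pvMergeGroupA g]) [b] b (by simp), List.map_cons,
        pvMergeGroupA_eq g hg]
      simp [pvExtE, pvExtB]

-- the two shapes of a pvStepB step on a nonempty accumulator
theorem pvStepB_join (vt ht : Int) (L : List (Int × Int × Int × Int))
    (a nxt b : Int × Int × Int × Int) (hadj : pvAdj vt ht b nxt = true) :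
    pvStepB vt ht (L ++ [a], some nxt) b = (L ++ [pvUnionE a (pvExtB b)], some b) := by
  simp only [pvAdj, Bool.and_eq_true, decide_eq_true_eq] at hadj
  simp [pvStepB, hadj.1, hadj.2, pvUnionE, pvExtB]

theorem pvStepB_skip (vt ht : Int) (acc : List (Int × Int × Int × Int))
    (nxt b : Int × Int × Int × Int) (hadj : pvAdj vt ht b nxt = false) :
    pvStepB vt ht (acc, some nxt) b = (acc ++ [pvExtB b], some b) := by
  have h1 : (decide (nxt.2.1 - (b.2.1 + b.2.2.2) ≤ vt) && decide (|nxt.1 - b.1| ≤ ht)) = false := hadj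
  simp only [pvStepB, h1, Bool.and_false]
  simp [pvExtB]

-- B's reverse sweep produces the same group extents, reversed
theorem pvFoldB_eq (vt ht : Int) (t : List (Int × Int × Int × Int)) :
    ∀ h : Int × Int × Int × Int,
      ((h :: t).reverse).foldl (pvStepB vt ht) ([], none)
        = ((pvRecE vt ht (pvExtB h) h t).reverse, some h) := by
  induction t with
  | nil =>
    intro h
    simp [pvStepB, pvRecE, pvExtB]
  | cons b t ih =>
    intro h
    rw [show (h :: b :: t).reverse = (b :: t).reverse ++ [h] by simp,
      List.foldl_append, ih b]
    rcases hL : pvRecE vt ht (pvExtB b) b t with _ | ⟨a, s⟩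
    · exact absurd hL (pvRecE_ne_nil vt ht (pvExtB b) b t)
    · rw [List.reverse_cons, List.foldl_cons, List.foldl_nil]
      by_cases hadj : pvAdj vt ht h b = true
      · rw [pvStepB_join vt ht s.reverse a b h hadj]
        have : pvRecE vt ht (pvExtB h) h (b :: t)
            = pvUnionE (pvExtB h) a :: s := by
          simp only [pvRecE, hadj, if_pos]
          rw [pvRecE_headUnion vt ht t (pvExtB h) (pvExtB b) b, hL]
          rfl
        rw [this, List.reverse_cons, pvUnionE_comm]
      · rw [pvStepB_skip vt ht (s.reverse ++ [a]) b h (by simpa using hadj)]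
        have : pvRecE vt ht (pvExtB h) h (b :: t) = pvExtB h :: a :: s := by
          simp only [pvRecE, hadj, hL]
          simp
        rw [this]
        simp

-- ===== VERDICT (by name: the statement is the Claim_ definition above) =====
theorem merge_vertical_boxes_spec : Claim_equal_merge_vertical_boxes := by
  intro boxes vt ht _
  unfold Spec_merge_vertical_boxes merge_vertical_boxes merge_vertical_boxes_alt
  by_cases hb : boxes = []
  · simp [hb, PySem.List.sorted]
  · simp only [hb, if_false]
    have hs : PySem.List.sorted boxes (fun box => box.2.1) false ≠ [] := by
      rw [Ne, PySem.List.sorted_eq_nil_iff]; exact hb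
    match hm : PySem.List.sorted boxes (fun box => box.2.1) false with
    | [] => exact absurd hm hs
    | h :: t =>
      have hred : (match h :: t with
          | [] => ([] : List (Int × Int × Int × Int))
          | h :: t => pvLoopA vt ht [] [h] t) = pvLoopA vt ht [] [h] t := rfl
      rw [hred, pvLoopA_eq vt ht t [] [h] h (by simp), pvFoldB_eq vt ht t h]
      have : pvExtE [h] = pvExtB h := rfl
      rw [this]
      simp [pvToBoxE]
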